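-- pv_equiv track=rewrite | github.com/kimkihoon0515/CodingTest | 프로그래머스/unrated/135808. 과일 장수/과일 장수.py | solution
-- ===== SOURCE A (Python) =====
-- def solution(k, m, score):
--
--     score = sorted(score,reverse=True)
--
--     res = [score[i:i+m] for i in range(0,len(score), m)]
--
--     result = []
--     for i in res :
--         if len(i) == m:
--             result.append(min(i) * m)
--     ans = sum(result)
--     return ans
-- ===== SOURCE B (Python) =====
-- def solution(k, m, score):
--     # Frequency-counting approach: count each score, walk the distinct scores in
--     # descending order, and for each one add value * (number of full boxes whose
--     # cheapest apple falls in its run).  The t-th full box's cheapest apple is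
--     # the (m*t)-th largest score, so a run covering ranks (c, c+cnt] contributes
--     # its value once per multiple of m inside that interval.
--     if m <= 0:
--         return 0  # a box of non-positive size can never be filled
--     freq = {}
--     for v in score:
--         freq[v] = freq.get(v, 0) + 1
--     total = 0
--     c = 0
--     for v in sorted(freq, reverse=True):
--         cnt = freq[v]
--         total += v * ((c + cnt) // m - c // m)
--         c += cnt
--     return total * m
-- ===== Notes on version B (the rewrite author's own statement) =====
-- stated objective: alternative
-- what changed: Instead of sorting descending, slicing into m-sized chunks and scanning each full chunk for its min, B builds a frequency dictionary, walks the distinct scores in descending order, and adds each value times the number of multiples of m its rank interval covers (the t-th box min is the (m*t)-th largest score), never materialising the sorted list or any chunk.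
import Mathlib
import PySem

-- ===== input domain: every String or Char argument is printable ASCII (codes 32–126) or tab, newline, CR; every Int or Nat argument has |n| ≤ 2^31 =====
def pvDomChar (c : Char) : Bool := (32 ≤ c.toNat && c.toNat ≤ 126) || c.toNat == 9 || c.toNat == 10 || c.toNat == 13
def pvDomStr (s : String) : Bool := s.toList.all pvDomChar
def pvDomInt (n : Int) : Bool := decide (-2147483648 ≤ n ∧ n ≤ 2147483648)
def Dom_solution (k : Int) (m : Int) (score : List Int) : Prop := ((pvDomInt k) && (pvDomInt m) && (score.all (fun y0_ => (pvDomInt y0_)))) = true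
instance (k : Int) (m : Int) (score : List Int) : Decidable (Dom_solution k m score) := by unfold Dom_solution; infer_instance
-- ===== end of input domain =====

-- B replaces A's descending sort + m-sized chunking + per-chunk min scan by a frequency
-- dictionary walked over its distinct scores in descending order, each contributing
-- value * (number of multiples of m in its rank interval) (objective: alternative).

-- ===== PORT A =====
def solution (k : Int) (m : Int) (score : List Int) : Int :=
  let score2 := PySem.List.sorted score (fun x => x) true
  let res := (PySem.List.pyRange 0 (score2.length : Int) m).map
      (fun i => PySem.List.slice score2 (some i) (some (i + m)))
  let result := res.foldl
      (fun acc i => if (i.length : Int) = m then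
          acc ++ [(PySem.List.min? i (fun x => x)).getD 0 * m] else acc) []
  result.sum
  -- min(i): min? is some on every chunk the branch accepts (length = m ≠ 0), so
  -- the .getD 0 default is never used on inputs satisfying Pre_solution.

-- ===== PORT B =====
def solution_alt (k : Int) (m : Int) (score : List Int) : Int :=
  if m ≤ 0 then 0
  else
    let freq := score.foldl (fun d v => d.insert v (d.getD v 0 + 1)) PySem.Dict.empty
    let res := (PySem.List.sorted freq.keys (fun x => x) true).foldl
        (fun (s : Int × Int) v =>
          let cnt := freq.getD v 0
          (s.1 + v * (PySem.Int.floordiv (s.2 + cnt) m - PySem.Int.floordiv s.2 m),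
           s.2 + cnt)) (0, 0)
    res.1 * m
  -- freq[v]: v is always a key of freq in the loop, so freq[v] = freq.getD v 0 exactly.

-- ===== PRECONDITION & SPEC =====
-- Pre_ excludes exactly m = 0, where A raises ValueError (range() arg 3 must not be zero).
def Pre_solution (k : Int) (m : Int) (score : List Int) : Prop := m ≠ 0
instance (k : Int) (m : Int) (score : List Int) : Decidable (Pre_solution k m score) := by unfold Pre_solution; infer_instance
def pvWitness_solution : Int × Int × List Int := (4, 2, [4, 1, 2, 2, 3])

def Spec_solution (k : Int) (m : Int) (score : List Int) (out : Int) : Prop := out = solution_alt k m score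
instance (k : Int) (m : Int) (score : List Int) (out : Int) : Decidable (Spec_solution k m score out) := by unfold Spec_solution; infer_instance

-- ===== CLAIM (what is proved, stated in full; the proofs are below) =====
def Claim_equal_solution : Prop := ∀ (k : Int) (m : Int) (score : List Int), Dom_solution k m score → Pre_solution k m score → Spec_solution k m score (solution k m score)

-- ===== LEMMAS AND PROOFS =====

lemma getLast_le_of_desc (l : List Int) (hp : l.Pairwise (fun a b => b ≤ a)) (h : l ≠ []) :
    ∀ y ∈ l, l.getLast h ≤ y := by
  induction l with
  | nil => simp at h
  | cons a t ih =>
    intro y hy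
    rcases List.pairwise_cons.mp hp with ⟨ha, hpt⟩
    by_cases ht : t = []
    · subst ht; simp_all
    · rw [List.getLast_cons ht]
      rcases List.mem_cons.mp hy with rfl | hy
      · exact ha _ (List.getLast_mem ht)
      · exact ih hpt ht y hy

lemma min?_desc (l : List Int) (h : l ≠ []) (hp : l.Pairwise (fun a b => b ≤ a)) :
    PySem.List.min? l (fun x => x) = some (l.getLast h) := by
  cases hmin : PySem.List.min? l (fun x => x) with
  | none => exact absurd ((PySem.List.min?_eq_none_iff l _).mp hmin) h
  | some v =>
    have hv := PySem.List.min?_mem hmin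
    have h1 : v ≤ l.getLast h := PySem.List.min?_isMin hmin _ (List.getLast_mem h)
    have h2 : l.getLast h ≤ v := getLast_le_of_desc l hp h v hv
    exact congrArg some (le_antisymm h1 h2)

lemma sorted_rev_eq_reverse (xs : List Int) :
    PySem.List.sorted xs (fun x => x) true = (PySem.List.sorted xs (fun x => x) false).reverse := by
  have h : (PySem.List.sorted xs (fun x => x) true).reverse = PySem.List.sorted xs (fun x => x) false := by
    apply PySem.List.eq_of_perm_of_pairwise_le_of_injective (fun x => x) (fun a b hab => hab)
    · exact (List.reverse_perm _).trans ((PySem.List.sorted_perm xs _ true).trans (PySem.List.sorted_perm xs _ false).symm)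
    · exact List.pairwise_reverse.mpr (PySem.List.sorted_pairwise_rev xs _)
    · exact PySem.List.sorted_pairwise xs _
  rw [← h, List.reverse_reverse]

lemma filter_lt_range (g c : Nat) (h : g ≤ c) :
    (List.range c).filter (fun q => decide (q < g)) = List.range g := by
  obtain ⟨t, rfl⟩ : ∃ t, c = g + t := ⟨c - g, by omega⟩
  rw [List.range_add, List.filter_append]
  rw [List.filter_eq_self.mpr (by intro a ha; simp [List.mem_range.mp ha])]
  rw [List.filter_eq_nil_iff.mpr (by intro a ha; simp at ha ⊢; omega)]
  simp

-- A's value for positive m: m times the sum, over the full groups, of the ascending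
-- sort's element at index n - m*(q+1) (the minimum of the (q+1)-th descending group).
lemma A_char (k : Int) (score : List Int) (mn : Nat) (hmn : 0 < mn) :
    solution k (mn : Int) score =
      ((List.range (score.length / mn)).map
        (fun q => (PySem.List.sorted score (fun x => x) false).getD (score.length - mn * (q + 1)) 0)).sum * (mn : Int) := by
  set s := PySem.List.sorted score (fun x => x) false with hs
  have hslen : s.length = score.length := PySem.List.length_sorted score _ false
  set nl := score.length with hnl
  set gn := nl / mn with hgn
  have hidx : ∀ q : Nat, q < gn → mn * (q + 1) ≤ nl := by
    intro q hq
    have h1 : q + 1 ≤ nl / mn := hq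
    have h2 : (q + 1) * mn ≤ nl := (Nat.le_div_iff_mul_le hmn).mp h1
    have h3 : (q + 1) * mn = mn * (q + 1) := by ring
    omega
  have hd : PySem.List.sorted score (fun x => x) true = s.reverse := by
    rw [hs]; exact sorted_rev_eq_reverse score
  have hdlen : s.reverse.length = nl := by simp [hslen]
  have hgoal : solution k (mn : Int) score =
      ((List.range gn).map (fun q => s.getD (nl - mn * (q + 1)) 0 * (mn : Int))).sum := by
    simp only [solution, hd, hdlen]
    set c := (nl + mn - 1) / mn with hc
    have hgc : gn ≤ c := Nat.div_le_div_right (by omega)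
    have hrange : PySem.List.pyRange 0 (nl : Int) (mn : Int) =
        (List.range c).map (fun q : Nat => ((mn * q : Nat) : Int)) := by
      rw [PySem.List.pyRange_of_pos _ _ (by exact_mod_cast hmn : (0:Int) < (mn:Int))]
      have hcnt : (if (0:Int) < (nl:Int) then (((nl:Int) - 0 + (mn:Int) - 1) / (mn:Int)).toNat else 0) = c := by
        split_ifs with h
        · have e1 : ((nl:Int) - 0 + (mn:Int) - 1) = ((nl + mn - 1 : Nat) : Int) := by omega
          rw [e1, ← Int.natCast_div, Int.toNat_natCast]
        · have hnl0 : nl = 0 := by omega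
          rw [hc, hnl0]
          symm
          apply Nat.div_eq_of_lt
          omega
      rw [hcnt]
      apply List.map_congr_left
      intro a _
      push_cast
      ring
    rw [hrange, List.map_map]
    have hchunk : ∀ q : Nat,
        ((fun i => PySem.List.slice s.reverse (some i) (some (i + (mn:Int)))) ∘ (fun q : Nat => ((mn * q : Nat) : Int))) q
          = (s.reverse.drop (mn * q)).take mn := by
      intro q
      simp only [Function.comp]
      have e2 : ((mn * q : Nat) : Int) + (mn : Int) = ((mn * q : Nat) : Int) + ((mn : Nat) : Int) := rfl
      rw [e2]
      exact PySem.List.slice_natCast_add s.reverse (mn * q) mn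
    rw [List.map_congr_left (fun q _ => hchunk q)]
    rw [PySem.List.foldl_append_ite (p := fun i => ((i.length : Int) = (mn : Int)))
        (f := fun i => (PySem.List.min? i (fun x => x)).getD 0 * (mn : Int))]
    rw [List.nil_append, List.filter_map, List.map_map]
    have hlen : ∀ q : Nat, ((s.reverse.drop (mn * q)).take mn).length = min mn (nl - mn * q) := by
      intro q
      simp [hdlen]
    have hfull : ∀ q : Nat, q < gn → ((s.reverse.drop (mn * q)).take mn).length = mn := by
      intro q hq
      rw [hlen]
      have := hidx q hq
      have e3 : mn * (q + 1) = mn * q + mn := by ring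
      omega
    have hfilter : (List.range c).filter
        ((fun i => decide ((i.length : Int) = (mn : Int))) ∘ (fun q => (s.reverse.drop (mn * q)).take mn))
          = List.range gn := by
      have hpred : ∀ a ∈ List.range c,
          ((fun i => decide ((i.length : Int) = (mn : Int))) ∘ (fun q => (s.reverse.drop (mn * q)).take mn)) a
            = decide (a < gn) := by
        intro q hq
        simp only [Function.comp, decide_eq_decide, hlen, Nat.cast_inj]
        constructor
        · intro hmin
          have e3 : mn * (q + 1) = mn * q + mn := by ring
          have h4 : min mn (nl - mn * q) = mn := by exact_mod_cast hmin
          have e4 : (q + 1) * mn = mn * q + mn := by ring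
          have h5 : mn * (q + 1) ≤ nl := by omega
          have h6 : (q + 1) * mn ≤ nl := by omega
          exact (Nat.le_div_iff_mul_le hmn).mpr h6
        · intro hq2
          have h7 := hidx q hq2
          have e3 : mn * (q + 1) = mn * q + mn := by ring
          have h8 : min mn (nl - mn * q) = mn := by omega
          exact_mod_cast h8
      rw [List.filter_congr hpred, filter_lt_range gn c hgc]
    rw [hfilter]
    apply congrArg List.sum
    apply List.map_congr_left
    intro q hq
    have hq' : q < gn := List.mem_range.mp hq
    have hle := hidx q hq'
    have e3 : mn * (q + 1) = mn * q + mn := by ring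
    set ch := (s.reverse.drop (mn * q)).take mn with hch
    have hchlen : ch.length = mn := hfull q hq'
    have hne : ch ≠ [] := by
      intro h0
      rw [h0] at hchlen
      simp at hchlen
      omega
    have hpair : ch.Pairwise (fun a b => b ≤ a) := by
      have hsub : ch.Sublist s.reverse := (List.take_sublist _ _).trans (List.drop_sublist _ _)
      exact List.Pairwise.sublist hsub (List.pairwise_reverse.mpr (by
        have := PySem.List.sorted_pairwise score (fun x : Int => x)
        rw [← hs] at this
        exact this))
    simp only [Function.comp, ← hch]
    rw [min?_desc ch hne hpair]
    have hlast : ch.getLast hne = s.getD (nl - mn * (q + 1)) 0 := by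
      rw [List.getLast_eq_getElem]
      have hlt : ch.length - 1 < ch.length := by omega
      have e5 : ch[ch.length - 1] = s.reverse[mn * q + (mn - 1)]'(by simp [hdlen]; omega) := by
        simp only [hch, List.getElem_take, List.getElem_drop]
        congr 1
        have h9 := hlen q
        omega
      rw [e5, List.getElem_reverse]
      rw [List.getD_eq_getElem s 0 (by rw [hslen]; omega : nl - mn * (q + 1) < s.length)]
      congr 1
      rw [hslen]
      omega
    rw [hlast]
    simp
  rw [hgoal, List.sum_map_mul_right]

-- sum over a nodup list of an indicator-weighted map
lemma sum_map_ite_mem (l : List Int) (hn : l.Nodup) (a : Int) (f : Int → Nat) :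
    (l.map (fun v => if v = a then f v else 0)).sum = if a ∈ l then f a else 0 := by
  induction l with
  | nil => simp
  | cons x t ih =>
    rcases List.nodup_cons.mp hn with ⟨hx, ht⟩
    by_cases hxa : x = a
    · subst hxa
      simp [ih ht, hx]
    · simp [hxa, ih ht, Ne.symm hxa]

-- The descending sort is the concatenation, over the distinct values in descending
-- order, of each value repeated its multiplicity.
lemma desc_sort_eq_flatMap (score : List Int) :
    PySem.List.sorted score (fun x => x) true =
      (PySem.List.sorted (PySem.Set.ofList score) (fun x => x) true).flatMap
        (fun v => List.replicate (score.count v) v) := by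
  set ks := PySem.List.sorted (PySem.Set.ofList score) (fun x => x) true with hks
  have hksnd : ks.Nodup := ((PySem.List.sorted_perm _ _ true).nodup_iff).mpr (PySem.Set.nodup_ofList score)
  have hksmem : ∀ a, a ∈ ks ↔ a ∈ score := by
    intro a
    rw [(PySem.List.sorted_perm _ _ true).mem_iff, PySem.Set.mem_ofList]
  have hperm : (ks.flatMap (fun v => List.replicate (score.count v) v)).Perm score := by
    rw [List.perm_iff_count]
    intro a
    rw [List.count_flatMap]
    have e1 : (ks.map (List.count a ∘ fun v => List.replicate (score.count v) v)).sum
        = (ks.map (fun v => if v = a then score.count v else 0)).sum := by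
      apply congrArg List.sum
      apply List.map_congr_left
      intro v _
      simp only [Function.comp, List.count_replicate, beq_iff_eq]
    rw [e1, sum_map_ite_mem ks hksnd a _]
    by_cases ha : a ∈ score
    · simp [(hksmem a).mpr ha]
    · have h2 : a ∉ ks := fun h => ha ((hksmem a).mp h)
      simp [List.count_eq_zero_of_not_mem ha, h2]
  have hkspair : ks.Pairwise (fun a b => b < a) := by
    have h1 := PySem.List.sorted_pairwise_rev (PySem.Set.ofList score) (fun x : Int => x)
    rw [← hks] at h1
    exact (hksnd.and h1).imp (fun h => lt_of_le_of_ne h.2 (fun he => h.1 he.symm))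
  -- both sides reversed are ascending-sorted permutations of score
  have hrev : (PySem.List.sorted score (fun x => x) true).reverse
      = (ks.flatMap (fun v => List.replicate (score.count v) v)).reverse := by
    apply PySem.List.eq_of_perm_of_pairwise_le_of_injective (fun x : Int => x) (fun a b hab => hab)
    · exact ((List.reverse_perm _).trans (PySem.List.sorted_perm score _ true)).trans
        ((List.reverse_perm _).trans hperm).symm
    · rw [sorted_rev_eq_reverse score, List.reverse_reverse]
      exact PySem.List.sorted_pairwise score _
    · rw [List.reverse_flatMap]
      rw [List.pairwise_flatMap]
      constructor
      · intro a _
        simp only [Function.comp, List.reverse_replicate]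
        exact List.pairwise_replicate.mpr (Or.inr le_rfl)
      · have h2 : ks.reverse.Pairwise (fun a b => a < b) := List.pairwise_reverse.mpr hkspair
        apply h2.imp
        intro a b hab x hx y hy
        simp only [Function.comp, List.reverse_replicate] at hx hy
        rw [List.eq_of_mem_replicate hx, List.eq_of_mem_replicate hy]
        exact hab.le
  have := congrArg List.reverse hrev
  simpa using this

-- the fold over value blocks, with running rank c, computes the sum over the multiples
-- of mn inside each block's rank interval of the flattened list's element there
lemma fold_blocks (mn : Nat) (hmn : 0 < mn) (cnt : Int → Nat) (bs : List Int) :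
    ∀ (acc : Int) (c0 : Nat),
    bs.foldl (fun (s : Int × Int) v =>
        (s.1 + v * (PySem.Int.floordiv (s.2 + ((cnt v : Nat) : Int)) (mn : Int)
                    - PySem.Int.floordiv s.2 (mn : Int)),
         s.2 + ((cnt v : Nat) : Int))) (acc, (c0 : Int))
      = (acc + ((List.range' (c0 / mn + 1)
            ((c0 + (bs.flatMap (fun v => List.replicate (cnt v) v)).length) / mn - c0 / mn)).map
            (fun t => (bs.flatMap (fun v => List.replicate (cnt v) v)).getD (mn * t - 1 - c0) 0)).sum,
         ((c0 + (bs.flatMap (fun v => List.replicate (cnt v) v)).length : Nat) : Int)) := by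
  induction bs with
  | nil => intro acc c0; simp
  | cons v bs ih =>
    intro acc c0
    simp only [List.foldl_cons]
    have ecast : (c0 : Int) + ((cnt v : Nat) : Int) = ((c0 + cnt v : Nat) : Int) := by push_cast; ring
    rw [ecast, PySem.Int.floordiv_natCast, PySem.Int.floordiv_natCast, ih]
    set c1 := c0 + cnt v with hc1
    set L' := bs.flatMap (fun w => List.replicate (cnt w) w) with hL'
    have hLcons : (v :: bs).flatMap (fun w => List.replicate (cnt w) w)
        = List.replicate (cnt v) v ++ L' := by simp [hL']
    rw [hLcons]
    have hlen : (List.replicate (cnt v) v ++ L').length = cnt v + L'.length := by simp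
    rw [Prod.mk.injEq, hlen]
    -- div facts for omega
    have hd0 := Nat.div_add_mod c0 mn
    have hm0 := Nat.mod_lt c0 hmn
    have hd1 := Nat.div_add_mod c1 mn
    have hm1 := Nat.mod_lt c1 hmn
    have hd2 := Nat.div_add_mod (c1 + L'.length) mn
    have hm2 := Nat.mod_lt (c1 + L'.length) hmn
    have hle01 : c0 / mn ≤ c1 / mn := Nat.div_le_div_right (by omega)
    have hle12 : c1 / mn ≤ (c1 + L'.length) / mn := Nat.div_le_div_right (by omega)
    refine ⟨?_, ?_⟩
    · -- first components
      have hsplit : List.range' (c0 / mn + 1) ((c0 + (cnt v + L'.length)) / mn - c0 / mn)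
          = List.range' (c0 / mn + 1) (c1 / mn - c0 / mn)
            ++ List.range' (c1 / mn + 1) ((c1 + L'.length) / mn - c1 / mn) := by
        have e1 : c0 + (cnt v + L'.length) = c1 + L'.length := by omega
        rw [e1]
        have e2 : (c1 + L'.length) / mn - c0 / mn
            = (c1 / mn - c0 / mn) + ((c1 + L'.length) / mn - c1 / mn) := by omega
        have e3 : c0 / mn + 1 + (c1 / mn - c0 / mn) = c1 / mn + 1 := by omega
        have h4 := List.range'_append_1 (s := c0 / mn + 1) (m := c1 / mn - c0 / mn)
          (n := (c1 + L'.length) / mn - c1 / mn)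
        rw [e3] at h4
        rw [e2, ← h4]
      rw [hsplit, List.map_append, List.sum_append]
      have hfirst : ((List.range' (c0 / mn + 1) (c1 / mn - c0 / mn)).map
          (fun t => (List.replicate (cnt v) v ++ L').getD (mn * t - 1 - c0) 0)).sum
            = v * (((c1 / mn : Nat) : Int) - ((c0 / mn : Nat) : Int)) := by
        have hmem : ∀ t ∈ List.range' (c0 / mn + 1) (c1 / mn - c0 / mn),
            (List.replicate (cnt v) v ++ L').getD (mn * t - 1 - c0) 0 = v := by
          intro t ht
          rw [List.mem_range'_1] at ht
          have hdt := Nat.div_add_mod t 1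
          have htlo : c0 / mn + 1 ≤ t := ht.1
          have hthi : t ≤ c1 / mn := by omega
          have h1 : mn * t ≤ mn * (c1 / mn) := Nat.mul_le_mul_left mn hthi
          have h2 : mn * (c0 / mn + 1) ≤ mn * t := Nat.mul_le_mul_left mn htlo
          have hidxlt : mn * t - 1 - c0 < cnt v := by
            have : mn * (c0 / mn + 1) = mn * (c0 / mn) + mn := by ring
            omega
          rw [List.getD_eq_getElem _ _ (by simp; omega)]
          rw [List.getElem_append_left (by simp; omega)]
          exact List.getElem_replicate _
        rw [List.map_congr_left hmem]
        rw [PySem.List.sum_map_const_int]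
        rw [List.length_range']
        push_cast [Nat.cast_sub hle01]
        ring
      rw [hfirst]
      have hsecond : ((List.range' (c1 / mn + 1) ((c1 + L'.length) / mn - c1 / mn)).map
          (fun t => (List.replicate (cnt v) v ++ L').getD (mn * t - 1 - c0) 0)).sum
            = ((List.range' (c1 / mn + 1) ((c1 + L'.length) / mn - c1 / mn)).map
          (fun t => L'.getD (mn * t - 1 - c1) 0)).sum := by
        apply congrArg List.sum
        apply List.map_congr_left
        intro t ht
        rw [List.mem_range'_1] at ht
        have htlo : c1 / mn + 1 ≤ t := ht.1
        have h2 : mn * (c1 / mn + 1) ≤ mn * t := Nat.mul_le_mul_left mn htlo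
        have hge : cnt v ≤ mn * t - 1 - c0 := by
          have : mn * (c1 / mn + 1) = mn * (c1 / mn) + mn := by ring
          omega
        rw [List.getD_append_right _ _ _ _ (by simp; omega)]
        congr 1
        simp
        omega
      rw [hsecond]
      ring
    · -- second components
      congr 1
      omega

-- B's value for positive m: the block-interval sum over the descending sort.
lemma B_char (k : Int) (score : List Int) (mn : Nat) (hmn : 0 < mn) :
    solution_alt k (mn : Int) score =
      ((List.range' 1 (score.length / mn)).map
        (fun t => (PySem.List.sorted score (fun x => x) true).getD (mn * t - 1) 0)).sum * (mn : Int) := by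
  have hm0 : ¬ ((mn : Int) ≤ 0) := by exact_mod_cast Nat.not_le.mpr hmn
  simp only [solution_alt, if_neg hm0, PySem.Dict.foldl_insert_getD_add_one_eq_counter,
    PySem.Dict.getD_counter, PySem.Dict.keys_counter]
  rw [show ((0 : Int), (0 : Int)) = ((0 : Int), ((0 : Nat) : Int)) from rfl]
  rw [fold_blocks mn hmn (fun v => score.count v)
      (PySem.List.sorted (PySem.Set.ofList score) (fun x => x) true) 0 0]
  rw [← desc_sort_eq_flatMap score]
  have hlen : (PySem.List.sorted score (fun x => x) true).length = score.length :=
    PySem.List.length_sorted score _ true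
  simp only [hlen, Nat.zero_div, Nat.sub_zero, zero_add]

-- for each full group, the descending-sort element at rank m*(q+1) is the ascending
-- sort's element at index n - m*(q+1)
lemma desc_getD_eq_asc (score : List Int) (mn : Nat) (hmn : 0 < mn) (q : Nat)
    (hq : q < score.length / mn) :
    (PySem.List.sorted score (fun x => x) true).getD (mn * (q + 1) - 1) 0
      = (PySem.List.sorted score (fun x => x) false).getD (score.length - mn * (q + 1)) 0 := by
  set s := PySem.List.sorted score (fun x => x) false with hs
  have hslen : s.length = score.length := PySem.List.length_sorted score _ false
  have hle : mn * (q + 1) ≤ score.length := by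
    have h2 : (q + 1) * mn ≤ score.length := (Nat.le_div_iff_mul_le hmn).mp hq
    have : (q + 1) * mn = mn * (q + 1) := by ring
    omega
  have h1 : 1 ≤ mn * (q + 1) := by
    have : 1 * 1 ≤ mn * (q + 1) := Nat.mul_le_mul hmn (by omega)
    omega
  rw [sorted_rev_eq_reverse score, ← hs]
  rw [List.getD_eq_getElem _ _ (by simp [hslen]; omega)]
  rw [List.getD_eq_getElem _ _ (by rw [hslen]; omega)]
  rw [List.getElem_reverse]
  congr 1
  rw [hslen]
  omega

lemma solution_pos (k m : Int) (score : List Int) (hm : 0 < m) :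
    solution k m score = solution_alt k m score := by
  obtain ⟨mn, rfl⟩ : ∃ mn : Nat, m = (mn : Int) := ⟨m.toNat, (Int.toNat_of_nonneg hm.le).symm⟩
  have hmn : 0 < mn := by exact_mod_cast hm
  rw [A_char k score mn hmn, B_char k score mn hmn]
  apply congrArg (· * ((mn : Nat) : Int))
  rw [List.range'_eq_map_range, List.map_map]
  apply congrArg List.sum
  apply List.map_congr_left
  intro q hq
  simp only [Function.comp]
  rw [show 1 + q = q + 1 by omega]
  exact (desc_getD_eq_asc score mn hmn q (List.mem_range.mp hq)).symm

lemma solution_neg (k m : Int) (score : List Int) (hm : m < 0) :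
    solution k m score = solution_alt k m score := by
  unfold solution solution_alt
  rw [if_pos hm.le]
  simp only [PySem.List.pyRange]
  rw [if_neg hm.ne]
  simp [not_lt_of_gt hm, show ¬ ((score.length:Int) < 0) by omega]

-- ===== VERDICT (by name: the statement is the Claim_ definition above) =====
theorem solution_spec : Claim_equal_solution := by
  intro k m score _ hpre
  unfold Spec_solution
  rcases lt_or_gt_of_ne hpre with hm | hm
  · exact solution_neg k m score hm
  · exact solution_pos k m score hm
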